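-- pv_equiv track=rewrite | github.com/Amin-Mohamed1/ConnectFourGame | Application/Services/HeuristicCriterias/CouldConnectFourInTwoMoves.py | __connected_twos_diagonal
-- ===== SOURCE A (Python) =====
-- def __connected_twos_diagonal(board: list[list[str]], piece: str) -> int:
--     score: int = 0
--     for row in range(len(board)):
--         for col in range(len(board[0])):
--             if board[row][col] == piece:
--                 if (row + 3 < len(board) and col + 3 < len(board[0])) and (board[row + 1][col + 1] == piece) and \
--                         board[row + 2][col + 2] == '' and board[row + 3][col + 3] == '':
--                     score += 1
--                 if (row + 3 < len(board) and col - 3 >= 0) and (board[row + 1][col - 1] == piece) and board[row + 2][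
--                     col - 2] == '' and board[row + 3][col - 3] == '':
--                     score += 1
--     return score
-- ===== SOURCE B (Python) =====
-- def __connected_twos_diagonal(board: list[list[str]], piece: str) -> int:
--     # Diagonal-line sweep: build every "\" and "/" diagonal of the h x w grid,
--     # then slide a length-4 window along each and count [piece, piece, '', ''].
--     if not board:
--         return 0
--     h, w = len(board), len(board[0])
--
--     def diag(r, c, dc):
--         cells = []
--         while r < h and 0 <= c < w:
--             cells.append(board[r][c])
--             r += 1
--             c += dc
--         return cells
--
--     def count4(seq):
--         return sum(1 for a, b, c, d in zip(seq, seq[1:], seq[2:], seq[3:])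
--                    if a == piece and b == piece and c == '' and d == '')
--
--     diags = [diag(0, c, 1) for c in range(w)] \
--         + [diag(r, 0, 1) for r in range(1, h)] \
--         + [diag(0, c, -1) for c in range(w)] \
--         + [diag(r, w - 1, -1) for r in range(1, h)]
--     return sum(count4(d) for d in diags)
-- ===== Notes on version B (the rewrite author's own statement) =====
-- stated objective: alternative
-- what changed: Replaces per-cell fixed-offset probing over the row/column grid with an explicit diagonal-line sweep: each "\" and "/" diagonal is materialized as a list and a length-4 sliding window [piece,piece,'',''] is counted along it.
import Mathlib
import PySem

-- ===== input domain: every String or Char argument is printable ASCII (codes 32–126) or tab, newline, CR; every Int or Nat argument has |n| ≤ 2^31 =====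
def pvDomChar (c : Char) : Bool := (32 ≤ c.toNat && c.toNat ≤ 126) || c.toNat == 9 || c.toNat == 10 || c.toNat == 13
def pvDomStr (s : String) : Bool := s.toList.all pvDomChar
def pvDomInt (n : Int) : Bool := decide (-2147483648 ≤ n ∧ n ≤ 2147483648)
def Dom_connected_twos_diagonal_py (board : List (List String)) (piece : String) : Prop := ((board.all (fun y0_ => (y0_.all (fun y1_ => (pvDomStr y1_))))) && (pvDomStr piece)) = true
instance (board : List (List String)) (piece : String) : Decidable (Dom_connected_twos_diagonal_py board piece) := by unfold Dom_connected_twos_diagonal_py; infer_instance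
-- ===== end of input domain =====

-- B replaces A's per-cell fixed-offset probing by a diagonal-line sweep (build every "\" and "/"
-- diagonal, slide a length-4 window along it); objective: alternative decomposition, same cost.

-- ===== PORT A =====
-- board[row][col] etc. are ported with getD; under Pre_ every evaluated index is in range, so this is exact.
def connected_twos_diagonal_py (board : List (List String)) (piece : String) : Int :=
  (List.range board.length).foldl (fun score row =>
    (List.range (board.headD []).length).foldl (fun score col =>
      if (board.getD row []).getD col "" = piece then
        let score :=
          if (row + 3 < board.length ∧ col + 3 < (board.headD []).length) ∧
             (board.getD (row+1) []).getD (col+1) "" = piece ∧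
             (board.getD (row+2) []).getD (col+2) "" = "" ∧
             (board.getD (row+3) []).getD (col+3) "" = "" then score + 1 else score
        if (row + 3 < board.length ∧ 3 ≤ col) ∧
           (board.getD (row+1) []).getD (col-1) "" = piece ∧
           (board.getD (row+2) []).getD (col-2) "" = "" ∧
           (board.getD (row+3) []).getD (col-3) "" = "" then score + 1 else score
      else score) score) 0

-- ===== PORT B =====
-- while r < h and 0 <= c < w: collect board[r][c]; r += 1; c += dc    (c stays an Int, as in Python;
-- the cell is read only under the guard 0 ≤ c, so c.toNat is exact there)
def pvWalk (board : List (List String)) (h w : Nat) (r : Nat) (c : Int) (dc : Int) : List String :=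
  if _hg : r < h ∧ 0 ≤ c ∧ c < (w : Int) then
    (board.getD r []).getD c.toNat "" :: pvWalk board h w (r+1) (c+dc) dc
  else []
termination_by h - r
decreasing_by omega

-- sum(1 for a,b,c,d in zip(seq, seq[1:], seq[2:], seq[3:]) if a==piece and b==piece and c=='' and d=='')
def pvCount4 (piece : String) (seq : List String) : Int :=
  ((seq.zip (seq.drop 1)).zip ((seq.drop 2).zip (seq.drop 3))).foldl
    (fun s x => if x.1.1 = piece ∧ x.1.2 = piece ∧ x.2.1 = "" ∧ x.2.2 = "" then s + 1 else s) 0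

def connected_twos_diagonal_py_alt (board : List (List String)) (piece : String) : Int :=
  match board with
  | [] => 0
  | row0 :: _ =>
    let h := board.length
    let w := row0.length
    let diags :=
      (List.range w).map (fun (c : Nat) => pvWalk board h w 0 (c : Int) 1)
      ++ (List.range' 1 (h-1)).map (fun r => pvWalk board h w r 0 1)
      ++ (List.range w).map (fun (c : Nat) => pvWalk board h w 0 (c : Int) (-1))
      ++ (List.range' 1 (h-1)).map (fun r => pvWalk board h w r ((w : Int) - 1) (-1))
    (diags.map (pvCount4 piece)).sum

-- ===== PRECONDITION & SPEC =====
-- Pre_ excludes exactly the boards on which A raises IndexError: some row shorter than row 0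
-- (A probes board[row][col] for every col < len(board[0])).
def Pre_connected_twos_diagonal_py (board : List (List String)) (_piece : String) : Prop :=
  ∀ row ∈ board, (board.headD []).length ≤ row.length
instance (board : List (List String)) (piece : String) : Decidable (Pre_connected_twos_diagonal_py board piece) := by unfold Pre_connected_twos_diagonal_py; infer_instance

def pvWitness_connected_twos_diagonal_py : List (List String) × String :=
  ([["x", "x", "o"], ["o", "x", ""], ["", "", ""], ["o", "", ""]], "x")

def Spec_connected_twos_diagonal_py (board : List (List String)) (piece : String) (out : Int) : Prop := out = connected_twos_diagonal_py_alt board piece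
instance (board : List (List String)) (piece : String) (out : Int) : Decidable (Spec_connected_twos_diagonal_py board piece out) := by unfold Spec_connected_twos_diagonal_py; infer_instance

-- ===== CLAIM (what is proved, stated in full; the proofs are below) =====
def Claim_equal_connected_twos_diagonal_py : Prop := ∀ (board : List (List String)) (piece : String), Dom_connected_twos_diagonal_py board piece → Pre_connected_twos_diagonal_py board piece → Spec_connected_twos_diagonal_py board piece (connected_twos_diagonal_py board piece)

-- ===== LEMMAS AND PROOFS =====

-- the cell accessor and per-position window indicators (H = number of rows, w = width used)
def pvCell (board : List (List String)) (r c : Nat) : String := (board.getD r []).getD c ""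

def pvG1 (board : List (List String)) (piece : String) (H w : Nat) (p : Nat × Nat) : Int :=
  if pvCell board p.1 p.2 = piece ∧ (p.1 + 3 < H ∧ p.2 + 3 < w) ∧
     pvCell board (p.1+1) (p.2+1) = piece ∧ pvCell board (p.1+2) (p.2+2) = "" ∧
     pvCell board (p.1+3) (p.2+3) = "" then 1 else 0

def pvG2 (board : List (List String)) (piece : String) (H : Nat) (p : Nat × Nat) : Int :=
  if pvCell board p.1 p.2 = piece ∧ (p.1 + 3 < H ∧ 3 ≤ p.2) ∧
     pvCell board (p.1+1) (p.2-1) = piece ∧ pvCell board (p.1+2) (p.2-2) = "" ∧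
     pvCell board (p.1+3) (p.2-3) = "" then 1 else 0

-- structural sliding-window count and the 4-element window test
def pvWin4 (piece : String) : List String → Bool
  | a :: b :: c :: d :: _ => a == piece && b == piece && c == "" && d == ""
  | _ => false

def pvCnt (piece : String) : List String → Int
  | [] => 0
  | x :: t => (if pvWin4 piece (x :: t) then 1 else 0) + pvCnt piece t

-- position lists of the diagonals, the grid, and the diagonal start cells
def pvPosDR (H w r c : Nat) : List (Nat × Nat) :=
  (List.range (min (H - r) (w - c))).map (fun i => (r + i, c + i))
def pvPosDL (H r c : Nat) : List (Nat × Nat) :=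
  (List.range (min (H - r) (c + 1))).map (fun i => (r + i, c - i))
def pvGrid (H w : Nat) : List (Nat × Nat) :=
  (List.range H).flatMap (fun r => (List.range w).map (fun c => (r, c)))
def pvStartsDR (H w : Nat) : List (Nat × Nat) :=
  (List.range w).map (fun c => (0, c)) ++ (List.range' 1 (H-1)).map (fun r => (r, 0))
def pvStartsDL (H w : Nat) : List (Nat × Nat) :=
  (List.range w).map (fun c => (0, c)) ++ (List.range' 1 (H-1)).map (fun r => (r, w - 1))

theorem pv_sum_map_flatMap {α β : Type} (l : List α) (f : α → List β) (g : β → Int) :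
    ((l.flatMap f).map g).sum = (l.map (fun x => ((f x).map g).sum)).sum := by
  induction l with
  | nil => simp
  | cons a t ih => simp [ih]

theorem pv_foldl_if_acc {α : Type} (p : α → Prop) [DecidablePred p]
    (l : List α) (s : Int) :
    l.foldl (fun s x => if p x then s + 1 else s) s
      = s + l.foldl (fun s x => if p x then s + 1 else s) 0 := by
  induction l generalizing s with
  | nil => simp
  | cons x t ih =>
      rw [List.foldl_cons, List.foldl_cons, ih (if p x then s + 1 else s),
        ih (if p x then (0:Int) + 1 else 0)]
      split_ifs <;> ring

theorem count4_eq_cnt (piece : String) (seq : List String) : pvCount4 piece seq = pvCnt piece seq := by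
  induction seq with
  | nil => rfl
  | cons a t ih =>
      rcases t with _ | ⟨b, _ | ⟨c, _ | ⟨d, t'⟩⟩⟩
      · simp [pvCount4, pvCnt, pvWin4]
      · simp [pvCount4, pvCnt, pvWin4]
      · simp [pvCount4, pvCnt, pvWin4]
      · -- long case: the zip of shifts decomposes as window :: zip of shifts of the tail
        have hz : ((a::b::c::d::t').zip ((a::b::c::d::t').drop 1)).zip
              (((a::b::c::d::t').drop 2).zip ((a::b::c::d::t').drop 3))
            = ((a,b),(c,d)) :: (((b::c::d::t').zip ((b::c::d::t').drop 1)).zip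
              (((b::c::d::t').drop 2).zip ((b::c::d::t').drop 3))) := by
          simp [List.zip]
        rw [pvCnt, ← ih]
        unfold pvCount4
        rw [hz, List.foldl_cons,
          pv_foldl_if_acc (fun x : (String × String) × (String × String) =>
            x.1.1 = piece ∧ x.1.2 = piece ∧ x.2.1 = "" ∧ x.2.2 = "")]
        congr 1
        by_cases hcond : a = piece ∧ b = piece ∧ c = "" ∧ d = ""
        · simp [pvWin4, hcond]
        · simp only [pvWin4]
          rw [if_neg hcond, if_neg (by simpa [pvWin4, Bool.and_eq_true] using hcond)]

-- unfolding lemmas for the walk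
theorem pvWalk_neg (board : List (List String)) (h w : Nat) (r : Nat) (c : Int) (dc : Int)
    (hc : c < 0) : pvWalk board h w r c dc = [] := by
  rw [pvWalk]; rw [dif_neg]; omega

theorem pvWalk_nat (board : List (List String)) (h w : Nat) (r : Nat) (c : Nat) (dc : Int) :
    pvWalk board h w r (c : Int) dc
      = if r < h ∧ c < w then pvCell board r c :: pvWalk board h w (r+1) ((c : Int) + dc) dc
        else [] := by
  rw [pvWalk]
  by_cases hg : r < h ∧ c < w
  · rw [dif_pos ⟨hg.1, Int.natCast_nonneg c, by exact_mod_cast hg.2⟩, if_pos hg]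
    simp [pvCell]
  · rw [dif_neg (by omega), if_neg hg]

theorem pvWalk_DR (board : List (List String)) (h w : Nat) (r : Nat) (c : Nat) :
    pvWalk board h w r (c : Int) 1
      = if r < h ∧ c < w then pvCell board r c :: pvWalk board h w (r+1) ((c+1 : Nat) : Int) 1
        else [] := by
  rw [pvWalk_nat]; norm_num

theorem pvWalk_DL (board : List (List String)) (h w : Nat) (r : Nat) (c : Nat) :
    pvWalk board h w r (c : Int) (-1)
      = if r < h ∧ c < w then
          pvCell board r c ::
            (if 1 ≤ c then pvWalk board h w (r+1) ((c-1 : Nat) : Int) (-1) else [])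
        else [] := by
  rw [pvWalk_nat]
  by_cases hc : 1 ≤ c
  · have : (c : Int) + (-1) = ((c - 1 : Nat) : Int) := by omega
    rw [this, if_pos hc]
  · have hc0 : c = 0 := by omega
    subst hc0
    rw [show ((0:Nat) : Int) + (-1) = (-1 : Int) from by norm_num,
        pvWalk_neg board h w (r+1) (-1) (-1) (by norm_num), if_neg hc]

-- the first window of a "\" walk is exactly A's first pattern test at its start cell
theorem pvWin4_walkDR (board : List (List String)) (piece : String) (H w r c : Nat)
    (hr : r < H) (hc : c < w) :
    (pvWin4 piece (pvWalk board H w r (c : Int) 1) = true)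
      ↔ (pvCell board r c = piece ∧ (r + 3 < H ∧ c + 3 < w) ∧
         pvCell board (r+1) (c+1) = piece ∧ pvCell board (r+2) (c+2) = "" ∧
         pvCell board (r+3) (c+3) = "") := by
  rw [pvWalk_DR, if_pos ⟨hr, hc⟩]
  by_cases h1 : r + 1 < H ∧ c + 1 < w
  · rw [pvWalk_DR, if_pos h1]
    by_cases h2 : r + 2 < H ∧ c + 2 < w
    · rw [show r + 1 + 1 = r + 2 from rfl, show c + 1 + 1 = c + 2 from rfl,
        pvWalk_DR, if_pos h2]
      by_cases h3 : r + 3 < H ∧ c + 3 < w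
      · rw [show r + 2 + 1 = r + 3 from rfl, show c + 2 + 1 = c + 3 from rfl,
          pvWalk_DR, if_pos h3]
        simp only [pvWin4, Bool.and_eq_true, beq_iff_eq]
        constructor
        · rintro ⟨⟨⟨ha, hb⟩, hc'⟩, hd⟩; exact ⟨ha, ⟨h3.1, h3.2⟩, hb, hc', hd⟩
        · rintro ⟨ha, _, hb, hc', hd⟩; exact ⟨⟨⟨ha, hb⟩, hc'⟩, hd⟩
      · rw [show r + 2 + 1 = r + 3 from rfl, show c + 2 + 1 = c + 3 from rfl,
          pvWalk_DR, if_neg h3]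
        simp only [pvWin4, Bool.false_eq_true, false_iff]
        rintro ⟨_, hb, _⟩; exact h3 ⟨hb.1, hb.2⟩
    · rw [show r + 1 + 1 = r + 2 from rfl, show c + 1 + 1 = c + 2 from rfl,
        pvWalk_DR, if_neg h2]
      simp only [pvWin4, Bool.false_eq_true, false_iff]
      rintro ⟨_, hb, _⟩; exact h2 ⟨by omega, by omega⟩
  · rw [pvWalk_DR, if_neg h1]
    simp only [pvWin4, Bool.false_eq_true, false_iff]
    rintro ⟨_, hb, _⟩; exact h1 ⟨by omega, by omega⟩

-- the first window of a "/" walk is exactly A's second pattern test at its start cell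
theorem pvWin4_walkDL (board : List (List String)) (piece : String) (H w r c : Nat)
    (hr : r < H) (hc : c < w) :
    (pvWin4 piece (pvWalk board H w r (c : Int) (-1)) = true)
      ↔ (pvCell board r c = piece ∧ (r + 3 < H ∧ 3 ≤ c) ∧
         pvCell board (r+1) (c-1) = piece ∧ pvCell board (r+2) (c-2) = "" ∧
         pvCell board (r+3) (c-3) = "") := by
  rw [pvWalk_DL, if_pos ⟨hr, hc⟩]
  by_cases hc1 : 1 ≤ c
  · rw [if_pos hc1]
    by_cases h1 : r + 1 < H ∧ c - 1 < w
    · rw [pvWalk_DL, if_pos h1]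
      by_cases hc2 : 1 ≤ c - 1
      · rw [if_pos hc2]
        by_cases h2 : r + 1 + 1 < H ∧ c - 1 - 1 < w
        · rw [pvWalk_DL, if_pos h2]
          by_cases hc3 : 1 ≤ c - 1 - 1
          · rw [if_pos hc3]
            by_cases h3 : r + 1 + 1 + 1 < H ∧ c - 1 - 1 - 1 < w
            · rw [pvWalk_DL, if_pos h3]
              simp only [pvWin4, Bool.and_eq_true, beq_iff_eq,
                show r + 1 + 1 = r + 2 from rfl, show r + 1 + 1 + 1 = r + 3 from rfl]
              constructor
              · rintro ⟨⟨⟨ha, hb⟩, hc'⟩, hd⟩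
                exact ⟨ha, ⟨by omega, by omega⟩, hb, hc', hd⟩
              · rintro ⟨ha, _, hb, hc', hd⟩
                exact ⟨⟨⟨ha, hb⟩, hc'⟩, hd⟩
            · rw [pvWalk_DL, if_neg h3]
              simp only [pvWin4, Bool.false_eq_true, false_iff]
              rintro ⟨_, hb, _⟩
              exact h3 ⟨by omega, by omega⟩
          · rw [if_neg hc3]
            simp only [pvWin4, Bool.false_eq_true, false_iff]
            rintro ⟨_, hb, _⟩
            omega
        · rw [pvWalk_DL, if_neg h2]
          simp only [pvWin4, Bool.false_eq_true, false_iff]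
          rintro ⟨_, hb, _⟩
          exact h2 ⟨by omega, by omega⟩
      · rw [if_neg hc2]
        simp only [pvWin4, Bool.false_eq_true, false_iff]
        rintro ⟨_, hb, _⟩
        omega
    · rw [pvWalk_DL, if_neg h1]
      simp only [pvWin4, Bool.false_eq_true, false_iff]
      rintro ⟨_, hb, _⟩
      exact h1 ⟨by omega, by omega⟩
  · rw [if_neg hc1]
    simp only [pvWin4, Bool.false_eq_true, false_iff]
    rintro ⟨_, hb, _⟩
    omega

-- cons/nil shapes of the diagonal position lists
theorem pvPosDR_nil (H w r c : Nat) (h : ¬ (r < H ∧ c < w)) : pvPosDR H w r c = [] := by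
  unfold pvPosDR
  have : min (H - r) (w - c) = 0 := by omega
  simp [this]

theorem pvPosDR_cons (H w r c : Nat) (hr : r < H) (hc : c < w) :
    pvPosDR H w r c = (r, c) :: pvPosDR H w (r+1) (c+1) := by
  unfold pvPosDR
  have hmin : min (H - r) (w - c) = min (H - (r+1)) (w - (c+1)) + 1 := by omega
  rw [hmin, List.range_succ_eq_map, List.map_cons, List.map_map]
  simp only [Nat.add_zero]
  congr 1
  apply List.map_congr_left
  intro i _
  simp only [Function.comp_apply, Nat.succ_eq_add_one, Prod.mk.injEq]
  omega

theorem pvPosDL_nil (H r c : Nat) (h : ¬ r < H) : pvPosDL H r c = [] := by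
  unfold pvPosDL
  have : min (H - r) (c + 1) = 0 := by omega
  simp [this]

theorem pvPosDL_cons (H r c : Nat) (hr : r < H) (hc : 1 ≤ c) :
    pvPosDL H r c = (r, c) :: pvPosDL H (r+1) (c-1) := by
  unfold pvPosDL
  have hmin : min (H - r) (c + 1) = min (H - (r+1)) ((c-1) + 1) + 1 := by omega
  rw [hmin, List.range_succ_eq_map, List.map_cons, List.map_map]
  simp only [Nat.add_zero, Nat.sub_zero]
  congr 1
  apply List.map_congr_left
  intro i _
  simp only [Function.comp_apply, Nat.succ_eq_add_one, Prod.mk.injEq]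
  omega

theorem pvPosDL_zero (H r : Nat) (hr : r < H) : pvPosDL H r 0 = [(r, 0)] := by
  unfold pvPosDL
  have : min (H - r) (0 + 1) = 1 := by omega
  simp [this]

-- the window count along a diagonal equals the sum of A's indicators over its cells
theorem pvCnt_walkDR (board : List (List String)) (piece : String) (H w : Nat) :
    ∀ (fuel : Nat) (r c : Nat), H - r ≤ fuel →
      pvCnt piece (pvWalk board H w r (c : Int) 1)
        = ((pvPosDR H w r c).map (pvG1 board piece H w)).sum := by
  intro fuel
  induction fuel with
  | zero =>
      intro r c hf
      rw [pvWalk_DR, if_neg (by omega), pvPosDR_nil _ _ _ _ (by omega)]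
      rfl
  | succ n ih =>
      intro r c hf
      by_cases hg : r < H ∧ c < w
      · have hwin := pvWin4_walkDR board piece H w r c hg.1 hg.2
        have hunf := pvWalk_DR board H w r c
        rw [if_pos hg] at hunf
        rw [pvPosDR_cons _ _ _ _ hg.1 hg.2, List.map_cons, List.sum_cons,
            ← ih (r+1) (c+1) (by omega), hunf, pvCnt, ← hunf]
        congr 1
        unfold pvG1
        by_cases hw4 : pvWin4 piece (pvWalk board H w r (c : Int) 1) = true
        · rw [if_pos hw4, if_pos (hwin.mp hw4)]
        · rw [if_neg hw4, if_neg (fun h => hw4 (hwin.mpr h))]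
      · rw [pvWalk_DR, if_neg hg, pvPosDR_nil _ _ _ _ hg]
        rfl

theorem pvCnt_walkDL (board : List (List String)) (piece : String) (H w : Nat) :
    ∀ (fuel : Nat) (r c : Nat), H - r ≤ fuel → c < w →
      pvCnt piece (pvWalk board H w r (c : Int) (-1))
        = ((pvPosDL H r c).map (pvG2 board piece H)).sum := by
  intro fuel
  induction fuel with
  | zero =>
      intro r c hf hc
      rw [pvWalk_DL, if_neg (by omega), pvPosDL_nil _ _ _ (by omega)]
      rfl
  | succ n ih =>
      intro r c hf hc
      by_cases hr : r < H
      · have hwin := pvWin4_walkDL board piece H w r c hr hc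
        have hfirst : (if pvWin4 piece (pvWalk board H w r (c : Int) (-1)) = true then (1:Int) else 0)
            = pvG2 board piece H (r, c) := by
          unfold pvG2
          by_cases hw4 : pvWin4 piece (pvWalk board H w r (c : Int) (-1)) = true
          · rw [if_pos hw4, if_pos (hwin.mp hw4)]
          · rw [if_neg hw4, if_neg (fun h => hw4 (hwin.mpr h))]
        have hunf := pvWalk_DL board H w r c
        rw [if_pos ⟨hr, hc⟩] at hunf
        by_cases hc1 : 1 ≤ c
        · rw [if_pos hc1] at hunf
          rw [pvPosDL_cons _ _ _ hr hc1, List.map_cons, List.sum_cons,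
              ← ih (r+1) (c-1) (by omega) (by omega), ← hfirst,
              hunf, pvCnt, ← hunf]
        · rw [if_neg hc1] at hunf
          have hc0 : c = 0 := by omega
          subst hc0
          rw [pvPosDL_zero _ _ hr]
          simp only [List.map_cons, List.map_nil, List.sum_cons, List.sum_nil, add_zero]
          rw [← hfirst, hunf, pvCnt, ← hunf]
          simp [pvCnt]
      · rw [pvWalk_DL, if_neg (by omega), pvPosDL_nil _ _ _ hr]
        rfl

-- membership characterisations
theorem pv_mem_posDR (H w r c : Nat) (p : Nat × Nat) :
    p ∈ pvPosDR H w r c ↔ ∃ i, i < min (H - r) (w - c) ∧ p.1 = r + i ∧ p.2 = c + i := by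
  simp only [pvPosDR, List.mem_map, List.mem_range]
  constructor
  · rintro ⟨i, hi, rfl⟩; exact ⟨i, hi, rfl, rfl⟩
  · rintro ⟨i, hi, h1, h2⟩
    exact ⟨i, hi, by rcases p with ⟨a, b⟩; simp_all⟩

theorem pv_mem_posDL (H r c : Nat) (p : Nat × Nat) :
    p ∈ pvPosDL H r c ↔ ∃ i, i < min (H - r) (c + 1) ∧ p.1 = r + i ∧ p.2 = c - i := by
  simp only [pvPosDL, List.mem_map, List.mem_range]
  constructor
  · rintro ⟨i, hi, rfl⟩; exact ⟨i, hi, rfl, rfl⟩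
  · rintro ⟨i, hi, h1, h2⟩
    exact ⟨i, hi, by rcases p with ⟨a, b⟩; simp_all⟩

theorem pv_mem_grid (H w : Nat) (p : Nat × Nat) : p ∈ pvGrid H w ↔ p.1 < H ∧ p.2 < w := by
  rcases p with ⟨a, b⟩
  simp [pvGrid, List.mem_flatMap, eq_comm]

-- nodup facts
theorem pv_nodup_posDR (H w r c : Nat) : (pvPosDR H w r c).Nodup := by
  apply List.Nodup.map _ (List.nodup_range)
  intro a b h
  simpa using h

theorem pv_nodup_posDL (H r c : Nat) : (pvPosDL H r c).Nodup := by
  apply List.Nodup.map _ (List.nodup_range)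
  intro a b h
  have := (Prod.mk.injEq _ _ _ _).mp h
  omega

theorem pv_nodup_grid (H w : Nat) : (pvGrid H w).Nodup := by
  apply List.nodup_flatMap.mpr
  refine ⟨fun r _ => ?_, ?_⟩
  · apply List.Nodup.map _ (List.nodup_range)
    intro a b h; simpa using h
  · apply List.Pairwise.imp ?_ (List.pairwise_lt_range)
    intro a b hab p hpa hpb
    simp only [List.mem_map] at hpa hpb
    rcases hpa with ⟨x, _, rfl⟩
    rcases hpb with ⟨y, _, h⟩
    have := (Prod.mk.injEq _ _ _ _).mp h
    omega

theorem pv_nodup_startsDR (H w : Nat) : (pvStartsDR H w).Nodup := by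
  unfold pvStartsDR
  apply List.Nodup.append
  · apply List.Nodup.map _ (List.nodup_range); intro a b h; simpa using h
  · apply List.Nodup.map _ (List.nodup_range' 1); intro a b h; simpa using h
  · intro p hp hq
    simp only [List.mem_map, List.mem_range, List.mem_range'] at hp hq
    rcases hp with ⟨x, _, rfl⟩
    rcases hq with ⟨y, ⟨i, hi, rfl⟩, h⟩
    have := (Prod.mk.injEq _ _ _ _).mp h
    omega

theorem pv_nodup_startsDL (H w : Nat) : (pvStartsDL H w).Nodup := by
  unfold pvStartsDL
  apply List.Nodup.append
  · apply List.Nodup.map _ (List.nodup_range); intro a b h; simpa using h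
  · apply List.Nodup.map _ (List.nodup_range' 1); intro a b h; simpa using h
  · intro p hp hq
    simp only [List.mem_map, List.mem_range, List.mem_range'] at hp hq
    rcases hp with ⟨x, _, rfl⟩
    rcases hq with ⟨y, ⟨i, hi, rfl⟩, h⟩
    have := (Prod.mk.injEq _ _ _ _).mp h
    omega

-- the "\" diagonals partition the grid
theorem pv_perm_DR (H w : Nat) :
    ((pvStartsDR H w).flatMap (fun s => pvPosDR H w s.1 s.2)).Perm (pvGrid H w) := by
  have hkey : ∀ s p : Nat × Nat, p ∈ pvPosDR H w s.1 s.2 →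
      (p.1 : Int) - p.2 = (s.1 : Int) - s.2 := by
    intro s p hp
    rw [pv_mem_posDR] at hp
    rcases hp with ⟨i, _, h1, h2⟩
    omega
  have hinj : ∀ s ∈ pvStartsDR H w, ∀ t ∈ pvStartsDR H w,
      (s.1 : Int) - s.2 = (t.1 : Int) - t.2 → s = t := by
    intro s hs t ht h
    unfold pvStartsDR at hs ht
    rw [List.mem_append] at hs ht
    simp only [List.mem_map, List.mem_range, List.mem_range'] at hs ht
    rcases hs with ⟨x, _, rfl⟩ | ⟨x, ⟨i, hi, rfl⟩, rfl⟩ <;>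
      rcases ht with ⟨y, _, rfl⟩ | ⟨y, ⟨j, hj, rfl⟩, rfl⟩ <;>
      simp_all <;> omega
  have hnodup : ((pvStartsDR H w).flatMap (fun s => pvPosDR H w s.1 s.2)).Nodup := by
    apply List.nodup_flatMap.mpr
    refine ⟨fun s _ => pv_nodup_posDR H w s.1 s.2, ?_⟩
    refine List.Pairwise.imp_of_mem ?_ (pv_nodup_startsDR H w)
    intro s t hs ht hne p hps hpt
    exact hne (hinj s hs t ht (((hkey s p hps).symm.trans (hkey t p hpt))))
  apply (List.perm_ext_iff_of_nodup hnodup (pv_nodup_grid H w)).mpr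
  intro p
  rw [List.mem_flatMap, pv_mem_grid]
  constructor
  · rintro ⟨s, hs, hp⟩
    rw [pv_mem_posDR] at hp
    rcases hp with ⟨i, hi, h1, h2⟩
    omega
  · rintro ⟨h1, h2⟩
    by_cases hle : p.1 ≤ p.2
    · refine ⟨(0, p.2 - p.1), ?_, ?_⟩
      · unfold pvStartsDR
        rw [List.mem_append]
        left
        simp only [List.mem_map, List.mem_range]
        exact ⟨p.2 - p.1, by omega, rfl⟩
      · rw [pv_mem_posDR]
        exact ⟨p.1, by omega, by omega, by omega⟩
    · refine ⟨(p.1 - p.2, 0), ?_, ?_⟩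
      · unfold pvStartsDR
        rw [List.mem_append]
        right
        simp only [List.mem_map, List.mem_range']
        exact ⟨p.1 - p.2, ⟨p.1 - p.2 - 1, by omega, by omega⟩, rfl⟩
      · rw [pv_mem_posDR]
        exact ⟨p.2, by omega, by omega, by omega⟩

-- the "/" diagonals partition the grid
theorem pv_perm_DL (H w : Nat) (hw : 0 < w) :
    ((pvStartsDL H w).flatMap (fun s => pvPosDL H s.1 s.2)).Perm (pvGrid H w) := by
  have hkey : ∀ s : Nat × Nat, s.2 < w → ∀ p, p ∈ pvPosDL H s.1 s.2 →
      p.1 + p.2 = s.1 + s.2 ∧ p.2 < w := by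
    intro s hs p hp
    rw [pv_mem_posDL] at hp
    rcases hp with ⟨i, _, h1, h2⟩
    omega
  have hmem : ∀ s ∈ pvStartsDL H w, s.2 < w := by
    intro s hs
    unfold pvStartsDL at hs
    rw [List.mem_append] at hs
    simp only [List.mem_map, List.mem_range, List.mem_range'] at hs
    rcases hs with ⟨x, hx, rfl⟩ | ⟨x, hx, rfl⟩ <;> omega
  have hinj : ∀ s ∈ pvStartsDL H w, ∀ t ∈ pvStartsDL H w,
      s.1 + s.2 = t.1 + t.2 → s = t := by
    intro s hs t ht h
    unfold pvStartsDL at hs ht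
    rw [List.mem_append] at hs ht
    simp only [List.mem_map, List.mem_range, List.mem_range'] at hs ht
    rcases hs with ⟨x, _, rfl⟩ | ⟨x, ⟨i, hi, rfl⟩, rfl⟩ <;>
      rcases ht with ⟨y, _, rfl⟩ | ⟨y, ⟨j, hj, rfl⟩, rfl⟩ <;>
      simp_all <;> omega
  have hnodup : ((pvStartsDL H w).flatMap (fun s => pvPosDL H s.1 s.2)).Nodup := by
    apply List.nodup_flatMap.mpr
    refine ⟨fun s _ => pv_nodup_posDL H s.1 s.2, ?_⟩
    refine List.Pairwise.imp_of_mem ?_ (pv_nodup_startsDL H w)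
    intro s t hs ht hne p hps hpt
    exact hne (hinj s hs t ht
      (((hkey s (hmem s hs) p hps).1.symm.trans (hkey t (hmem t ht) p hpt).1)))
  apply (List.perm_ext_iff_of_nodup hnodup (pv_nodup_grid H w)).mpr
  intro p
  rw [List.mem_flatMap, pv_mem_grid]
  constructor
  · rintro ⟨s, hs, hp⟩
    have h2 := (hkey s (hmem s hs) p hp).2
    rw [pv_mem_posDL] at hp
    rcases hp with ⟨i, hi, h1, _⟩
    omega
  · rintro ⟨h1, h2⟩
    by_cases hle : p.1 + p.2 < w
    · refine ⟨(0, p.1 + p.2), ?_, ?_⟩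
      · unfold pvStartsDL
        rw [List.mem_append]
        left
        simp only [List.mem_map, List.mem_range]
        exact ⟨p.1 + p.2, by omega, rfl⟩
      · rw [pv_mem_posDL]
        exact ⟨p.1, by omega, by omega, by omega⟩
    · refine ⟨(p.1 + p.2 - (w - 1), w - 1), ?_, ?_⟩
      · unfold pvStartsDL
        rw [List.mem_append]
        right
        simp only [List.mem_map, List.mem_range']
        exact ⟨p.1 + p.2 - (w - 1), ⟨p.1 + p.2 - (w - 1) - 1, by omega, by omega⟩, rfl⟩
      · rw [pv_mem_posDL]
        exact ⟨w - 1 - p.2, by omega, by omega, by omega⟩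

-- ===== assembling both sides =====

theorem pv_A_eq_gridsum (board : List (List String)) (piece : String) :
    connected_twos_diagonal_py board piece
      = ((pvGrid board.length (board.headD []).length).map
          (fun p => pvG1 board piece board.length (board.headD []).length p
                    + pvG2 board piece board.length p)).sum := by
  unfold connected_twos_diagonal_py
  have hstep : ∀ (row : Nat) (s : Int), ∀ col ∈ List.range (board.headD []).length,
      (if (board.getD row []).getD col "" = piece then
        let score :=
          if (row + 3 < board.length ∧ col + 3 < (board.headD []).length) ∧
             (board.getD (row+1) []).getD (col+1) "" = piece ∧
             (board.getD (row+2) []).getD (col+2) "" = "" ∧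
             (board.getD (row+3) []).getD (col+3) "" = "" then s + 1 else s
        if (row + 3 < board.length ∧ 3 ≤ col) ∧
           (board.getD (row+1) []).getD (col-1) "" = piece ∧
           (board.getD (row+2) []).getD (col-2) "" = "" ∧
           (board.getD (row+3) []).getD (col-3) "" = "" then score + 1 else score
      else s)
      = s + (pvG1 board piece board.length (board.headD []).length (row, col)
             + pvG2 board piece board.length (row, col)) := by
    intro row s col _
    simp only [pvG1, pvG2, pvCell]
    split_ifs with h1 h2 h3 h4 h5 <;> first
      | ring1
      | (exfalso; tauto)
  have hinner : ∀ (s : Int), ∀ row ∈ List.range board.length,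
      (List.range (board.headD []).length).foldl (fun score col =>
        if (board.getD row []).getD col "" = piece then
          let score :=
            if (row + 3 < board.length ∧ col + 3 < (board.headD []).length) ∧
               (board.getD (row+1) []).getD (col+1) "" = piece ∧
               (board.getD (row+2) []).getD (col+2) "" = "" ∧
               (board.getD (row+3) []).getD (col+3) "" = "" then score + 1 else score
          if (row + 3 < board.length ∧ 3 ≤ col) ∧
             (board.getD (row+1) []).getD (col-1) "" = piece ∧
             (board.getD (row+2) []).getD (col-2) "" = "" ∧
             (board.getD (row+3) []).getD (col-3) "" = "" then score + 1 else score
        else score) s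
      = s + ((List.range (board.headD []).length).map
          (fun col => pvG1 board piece board.length (board.headD []).length (row, col)
                      + pvG2 board piece board.length (row, col))).sum := by
    intro s row _
    rw [List.foldl_ext _ (fun (score : Int) (col : Nat) =>
        score + (pvG1 board piece board.length (board.headD []).length (row, col)
                 + pvG2 board piece board.length (row, col))) s (hstep row),
      PySem.List.foldl_add]
  rw [List.foldl_ext _ (fun (score : Int) (row : Nat) =>
      score + ((List.range (board.headD []).length).map
        (fun col => pvG1 board piece board.length (board.headD []).length (row, col)
                    + pvG2 board piece board.length (row, col))).sum) 0 hinner,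
    PySem.List.foldl_add, zero_add, pvGrid, pv_sum_map_flatMap]
  congr 1
  apply List.map_congr_left
  intro r _
  rw [List.map_map]
  rfl

theorem pv_B_eq_diagsums (board : List (List String)) (piece : String)
    (hw : 0 < (board.headD []).length) :
    connected_twos_diagonal_py_alt board piece
      = (((pvStartsDR board.length (board.headD []).length).flatMap
            (fun s => pvPosDR board.length (board.headD []).length s.1 s.2)).map
          (pvG1 board piece board.length (board.headD []).length)).sum
        + (((pvStartsDL board.length (board.headD []).length).flatMap
            (fun s => pvPosDL board.length s.1 s.2)).map
          (pvG2 board piece board.length)).sum := by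
  rcases board with _ | ⟨row0, rest⟩
  · simp at hw
  · simp only [List.headD_cons] at hw ⊢
    simp only [connected_twos_diagonal_py_alt]
    rw [pv_sum_map_flatMap, pv_sum_map_flatMap]
    unfold pvStartsDR pvStartsDL
    simp only [List.map_append, List.sum_append, List.map_map]
    have h1 : ∀ c ∈ List.range row0.length,
        (pvCount4 piece ∘ fun (c : Nat) => pvWalk (row0 :: rest) (row0 :: rest).length row0.length 0 (c : Int) 1) c
          = ((fun s : Nat × Nat => ((pvPosDR (row0 :: rest).length row0.length s.1 s.2).map
              (pvG1 (row0 :: rest) piece (row0 :: rest).length row0.length)).sum) ∘ fun c => ((0 : Nat), c)) c := by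
      intro c _
      simp only [Function.comp_apply, count4_eq_cnt]
      exact pvCnt_walkDR (row0 :: rest) piece (row0 :: rest).length row0.length
        (row0 :: rest).length 0 c (by omega)
    have h2 : ∀ r ∈ List.range' 1 ((row0 :: rest).length - 1),
        (pvCount4 piece ∘ fun r => pvWalk (row0 :: rest) (row0 :: rest).length row0.length r 0 1) r
          = ((fun s : Nat × Nat => ((pvPosDR (row0 :: rest).length row0.length s.1 s.2).map
              (pvG1 (row0 :: rest) piece (row0 :: rest).length row0.length)).sum) ∘ fun r => (r, (0 : Nat))) r := by
      intro r _
      simp only [Function.comp_apply, count4_eq_cnt]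
      have := pvCnt_walkDR (row0 :: rest) piece (row0 :: rest).length row0.length
        (row0 :: rest).length r 0 (by omega)
      rw [Nat.cast_zero] at this
      exact this
    have h3 : ∀ c ∈ List.range row0.length,
        (pvCount4 piece ∘ fun (c : Nat) => pvWalk (row0 :: rest) (row0 :: rest).length row0.length 0 (c : Int) (-1)) c
          = ((fun s : Nat × Nat => ((pvPosDL (row0 :: rest).length s.1 s.2).map
              (pvG2 (row0 :: rest) piece (row0 :: rest).length)).sum) ∘ fun c => ((0 : Nat), c)) c := by
      intro c hc
      simp only [List.mem_range] at hc
      simp only [Function.comp_apply, count4_eq_cnt]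
      exact pvCnt_walkDL (row0 :: rest) piece (row0 :: rest).length row0.length
        (row0 :: rest).length 0 c (by omega) hc
    have h4 : ∀ r ∈ List.range' 1 ((row0 :: rest).length - 1),
        (pvCount4 piece ∘ fun r => pvWalk (row0 :: rest) (row0 :: rest).length row0.length r ((row0.length : Int) - 1) (-1)) r
          = ((fun s : Nat × Nat => ((pvPosDL (row0 :: rest).length s.1 s.2).map
              (pvG2 (row0 :: rest) piece (row0 :: rest).length)).sum) ∘ fun r => (r, row0.length - 1)) r := by
      intro r _
      simp only [Function.comp_apply, count4_eq_cnt]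
      have hcast : ((row0.length : Int) - 1) = (((row0.length - 1 : Nat)) : Int) := by omega
      rw [hcast]
      exact pvCnt_walkDL (row0 :: rest) piece (row0 :: rest).length row0.length
        (row0 :: rest).length r (row0.length - 1) (by omega) (by omega)
    rw [List.map_congr_left h1, List.map_congr_left h2, List.map_congr_left h3,
        List.map_congr_left h4]
    ring

-- ===== VERDICT (by name: the statement is the Claim_ definition above) =====
theorem connected_twos_diagonal_py_spec : Claim_equal_connected_twos_diagonal_py := by
  intro board piece _hdom _hpre
  unfold Spec_connected_twos_diagonal_py
  by_cases hw : 0 < (board.headD []).length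
  · rw [pv_A_eq_gridsum, pv_B_eq_diagsums board piece hw,
      show (fun p => pvG1 board piece board.length (board.headD []).length p
            + pvG2 board piece board.length p)
          = (fun p => (pvG1 board piece board.length (board.headD []).length) p
            + (pvG2 board piece board.length) p) from rfl,
      PySem.List.sum_map_add_int,
      ((pv_perm_DR board.length (board.headD []).length).map
          (pvG1 board piece board.length (board.headD []).length)).sum_eq,
      ((pv_perm_DL board.length (board.headD []).length hw).map
          (pvG2 board piece board.length)).sum_eq]
  · -- width 0: the grid is empty and every diagonal of B is empty as well
    have hw0 : (board.headD []).length = 0 := by omega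
    have hgrid : pvGrid board.length (board.headD []).length = [] := by
      rw [hw0]; simp [pvGrid]
    rw [pv_A_eq_gridsum, hgrid]
    rcases board with _ | ⟨row0, rest⟩
    · rfl
    · simp only [List.headD_cons] at hw0
      simp only [connected_twos_diagonal_py_alt, hw0]
      have hl : ∀ r : Nat, pvWalk (row0 :: rest) (rest.length + 1) 0 r 0 1 = [] := by
        intro r
        have h := pvWalk_nat (row0 :: rest) (rest.length + 1) 0 r 0 1
        rw [Nat.cast_zero] at h
        rw [h, if_neg (by omega)]
      have hr : ∀ r : Nat, pvWalk (row0 :: rest) (rest.length + 1) 0 r (-1) (-1) = [] := by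
        intro r
        exact pvWalk_neg _ _ _ _ _ _ (by norm_num)
      simp [hl, hr, pvCount4, zero_sub]
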